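-- pv_equiv track=rewrite | github.com/SaadaneRania/Sudoku | sudoku (3).py | region
-- ===== SOURCE A (Python) =====
-- def region(x, i):
--     liste = []
--     for num_ligne in range (1, 10):
--         for num_colonne in range (1, 10):
--             k = 3 * ((num_ligne-1)//3) + ((num_colonne-1)//3) + 1
--             if int(k) == i:
--                 liste.append(x[num_ligne-1][num_colonne-1])
--     return liste
-- ===== SOURCE B (Python) =====
-- def region(x, i):
--     if i in range(1, 10):
--         r = (int(i) - 1) // 3 * 3
--         c = (int(i) - 1) % 3 * 3
--         return [x[r + a][c + b] for a in range(3) for b in range(3)]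
--     return []
-- ===== Notes on version B (the rewrite author's own statement) =====
-- stated objective: simpler
-- what changed: B computes the block's top-left corner from i by //3 and %3 and reads only the 9 target cells directly, instead of scanning all 81 cells and filtering by a recomputed block number.
import Mathlib
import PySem

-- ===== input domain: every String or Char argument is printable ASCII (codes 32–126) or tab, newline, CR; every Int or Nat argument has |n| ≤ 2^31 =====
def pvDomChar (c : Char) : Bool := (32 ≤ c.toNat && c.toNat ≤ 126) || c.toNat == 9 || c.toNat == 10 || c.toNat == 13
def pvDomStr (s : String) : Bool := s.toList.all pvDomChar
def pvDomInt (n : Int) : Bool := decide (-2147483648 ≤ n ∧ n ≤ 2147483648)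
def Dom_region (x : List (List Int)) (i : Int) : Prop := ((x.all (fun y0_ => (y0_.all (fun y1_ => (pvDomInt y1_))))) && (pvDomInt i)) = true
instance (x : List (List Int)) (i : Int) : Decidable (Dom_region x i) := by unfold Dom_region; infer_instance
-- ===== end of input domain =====

-- B visits only the 9 cells of block i directly from its computed corner instead of scanning all 81 cells; equal return values proved on Pre_.

-- ===== PORT A =====
def region (x : List (List Int)) (i : Int) : List Int :=
  (PySem.List.pyRange 1 10 1).foldl (fun liste nl =>
    (PySem.List.pyRange 1 10 1).foldl (fun liste nc =>
      let k := 3 * (PySem.Int.floordiv (nl - 1) 3) + (PySem.Int.floordiv (nc - 1) 3) + 1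
      if k = i then
        liste ++ [PySem.List.pyGetD (PySem.List.pyGetD x (nl - 1) []) (nc - 1) 0]
      else liste) liste) []

-- ===== PORT B =====
def region_alt (x : List (List Int)) (i : Int) : List Int :=
  if 1 ≤ i ∧ i < 10 then
    let r := PySem.Int.floordiv (i - 1) 3 * 3
    let c := PySem.Int.mod (i - 1) 3 * 3
    (PySem.List.pyRange 0 3 1).flatMap (fun a =>
      (PySem.List.pyRange 0 3 1).map (fun b =>
        PySem.List.pyGetD (PySem.List.pyGetD x (r + a) []) (c + b) 0))
  else []

-- ===== PRECONDITION & SPEC =====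
-- Pre_ excludes exactly the inputs where A raises IndexError: when i names a block (1..9),
-- the grid must contain that block's 3 rows, each long enough for its 3 columns.
def Pre_region (x : List (List Int)) (i : Int) : Prop :=
  (1 ≤ i ∧ i ≤ 9) →
    ∀ a ∈ List.range 3,
      (3 * ((i - 1) / 3)).toNat + a < x.length ∧
      (3 * ((i - 1) % 3)).toNat + 3 ≤ (x.getD ((3 * ((i - 1) / 3)).toNat + a) []).length
instance (x : List (List Int)) (i : Int) : Decidable (Pre_region x i) := by
  unfold Pre_region; infer_instance

def pvWitness_region : List (List Int) × Int :=
  ([[1,2,3,4,5,6,7,8,9],[2,3,4,5,6,7,8,9,1],[3,4,5,6,7,8,9,1,2],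
    [4,5,6,7,8,9,1,2,3],[5,6,7,8,9,1,2,3,4],[6,7,8,9,1,2,3,4,5],
    [7,8,9,1,2,3,4,5,6],[8,9,1,2,3,4,5,6,7],[9,1,2,3,4,5,6,7,8]], 5)

def Spec_region (x : List (List Int)) (i : Int) (out : List Int) : Prop := out = region_alt x i
instance (x : List (List Int)) (i : Int) (out : List Int) : Decidable (Spec_region x i out) := by
  unfold Spec_region; infer_instance

-- ===== CLAIM (what is proved, stated in full; the proofs are below) =====
def Claim_equal_region : Prop := ∀ (x : List (List Int)) (i : Int), Dom_region x i → Pre_region x i → Spec_region x i (region x i)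

-- ===== LEMMAS AND PROOFS =====

-- ===== VERDICT (by name: the statement is the Claim_ definition above) =====
theorem region_spec : Claim_equal_region := by
  intro x i _ hpre
  unfold Spec_region
  by_cases h : 1 ≤ i ∧ i ≤ 9
  · have hp := hpre h
    obtain ⟨h1, h9⟩ := h
    interval_cases i <;>
      simp_all [region, region_alt, PySem.List.pyRange, PySem.Int.floordiv,
        PySem.Int.mod, List.foldl, List.range, List.range.loop, List.getD]
  · have c1 : ¬ ((1:Int) = i) := by omega
    have c2 : ¬ ((2:Int) = i) := by omega
    have c3 : ¬ ((3:Int) = i) := by omega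
    have c4 : ¬ ((4:Int) = i) := by omega
    have c5 : ¬ ((5:Int) = i) := by omega
    have c6 : ¬ ((6:Int) = i) := by omega
    have c7 : ¬ ((7:Int) = i) := by omega
    have c8 : ¬ ((8:Int) = i) := by omega
    have c9 : ¬ ((9:Int) = i) := by omega
    have cb : ¬ (1 ≤ i ∧ i < 10) := by omega
    simp [region, region_alt, PySem.List.pyRange, PySem.Int.floordiv, List.range_succ,
      c1, c2, c3, c4, c5, c6, c7, c8, c9, cb]
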